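-- pv_equiv track=rewrite | github.com/keepcalmandchapchap/work_with_files | 1-2_quests.py | make_cook_book
-- ===== SOURCE A (Python) =====
-- def make_cook_book(file):
--     list_ingr = file.split('\n')
--     list_ingr.append('')
--     def formating(splitted_list):
--         format_ingr = []
--         iter_list = []
--         for ind, line in enumerate(splitted_list):
--             if line != '':
--                 iter_list += [line]
--             else:
--                 format_ingr.append(iter_list)
--                 iter_list = []
--         return format_ingr
--
--     def add_dish(format_list):
--         cook_book = {}
--         for i in format_list:
--             cook_book[i[0]] = []
--             comfr = cook_book[i[0]]
--             for ingr in i[2:]: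
--                 dict_ingr = {}
--                 list_ingr = ingr.split(' | ')
--                 dict_ingr['ingridient'] = list_ingr[0]
--                 dict_ingr['quantity'] = list_ingr[1]
--                 dict_ingr['measure'] = list_ingr[2]
--                 comfr.append(dict_ingr)
--         return cook_book
--
--     format_ingr = formating(list_ingr)
--     cook_book_in_func = add_dish(format_ingr)
--     return cook_book_in_func
-- ===== SOURCE B (Python) =====
-- def make_cook_book(file):
--     def parse(lines):
--         if not lines:
--             return {}
--         cut = lines.index('')
--         head = lines[:cut]
--         book = {head[0]: [dict(zip(('ingridient', 'quantity', 'measure'),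
--                                    row.split(' | ')))
--                           for row in head[2:]]}
--         book.update(parse(lines[cut + 1:]))
--         return book
--     return parse(file.split('\n') + [''])
-- ===== Notes on version B (the rewrite author's own statement) =====
-- stated objective: alternative
-- what changed: B replaces A's iterative two-pass pipeline (per-line state-machine grouping into a list of blocks, then a second loop of dict inserts with repeated in-place appends) by a recursive-descent parser that finds each block boundary with lines.index(''), slices the block off, builds its entry as dict(zip(...)) per row, and merges the recursively parsed remainder with dict.update.
import Mathlib
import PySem

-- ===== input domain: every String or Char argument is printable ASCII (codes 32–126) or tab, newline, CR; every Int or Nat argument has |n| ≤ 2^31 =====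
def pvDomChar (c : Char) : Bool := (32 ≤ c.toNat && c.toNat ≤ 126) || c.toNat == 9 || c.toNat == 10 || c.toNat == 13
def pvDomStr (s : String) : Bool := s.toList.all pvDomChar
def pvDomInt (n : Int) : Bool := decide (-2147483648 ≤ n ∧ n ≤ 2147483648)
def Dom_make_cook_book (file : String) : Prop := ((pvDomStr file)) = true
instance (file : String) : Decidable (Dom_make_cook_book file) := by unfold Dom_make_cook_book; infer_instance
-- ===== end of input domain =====

-- B replaces A's iterative two-pass pipeline (per-line state-machine grouping, then a loop of
-- dict inserts with in-place appends) by a recursive-descent parser: find the next empty line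
-- with .index, slice the block off, build its one-entry dict and merge the recursively parsed
-- remainder into it with dict.update; same return value wherever A returns.

-- shared primitive wrapper: Python's s.split(sep) for a non-empty literal sep (split? is some there)
def pvSplit (s sep : String) : List String := (PySem.Str.split? s sep).getD []

-- ===== PORT A =====
-- A's dict_ingr is built key by key into a fresh dict (insertion order), then read as an assoc list
def pvIngrRow (ingr : String) : List (String × String) :=
  let li := pvSplit ingr " | "
  -- li[0], li[1], li[2]: pyGetD is exact under Pre_ (every ingredient line has ≥ 3 parts)
  ((((PySem.Dict.empty : PySem.Dict String String).insert "ingridient" (PySem.List.pyGetD li 0 "")).insert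
      "quantity" (PySem.List.pyGetD li 1 "")).insert "measure" (PySem.List.pyGetD li 2 "")).items

-- the body of A's 'formating' loop (index from enumerate is bound but unused, as in A)
def pvFormatStep (s : List (List String) × List String) (p : Int × String) :
    List (List String) × List String :=
  if p.2 ≠ "" then (s.1, s.2 ++ [p.2]) else (s.1 ++ [s.2], [])

def pvFormating (ls : List String) : List (List String) :=
  ((PySem.List.enumerate ls).foldl pvFormatStep ([], [])).1

-- the body of A's 'add_dish' loop: insert an empty list, then append each ingredient row to it
def pvAddDish (cb : PySem.Dict String (List (List (String × String)))) (i : List String) :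
    PySem.Dict String (List (List (String × String))) :=
  let key := PySem.List.pyGetD i 0 ""   -- i[0]: exact under Pre_ (blocks are non-empty)
  (PySem.List.slice i (some 2) none).foldl
    (fun cb ingr => cb.modify key [] (· ++ [pvIngrRow ingr])) (cb.insert key [])

def make_cook_book (file : String) : List (String × List (List (String × String))) :=
  let list_ingr := pvSplit file "\n" ++ [""]
  ((pvFormating list_ingr).foldl pvAddDish PySem.Dict.empty).items

-- ===== PORT B =====
-- dict(zip(('ingridient','quantity','measure'), row.split(' | ')))
def pvRowB (row : String) : List (String × String) :=
  (PySem.Dict.ofList (List.zip ["ingridient", "quantity", "measure"] (pvSplit row " | "))).items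

-- B's recursive parser: head block up to the first empty line, recurse on the rest, dict-merge
def pvParse : List String → PySem.Dict String (List (List (String × String)))
  | [] => PySem.Dict.empty
  | x :: rest =>
    match PySem.List.index? (x :: rest) "" with
    | none => PySem.Dict.empty   -- unreachable from make_cook_book_alt: its line list ends in ""
                                 -- (Python's .index would raise ValueError here)
    | some cut =>
      let head := (x :: rest).take cut          -- lines[:cut], cut = lines.index('') ∈ ℕ
      ((PySem.Dict.empty : PySem.Dict String (List (List (String × String)))).insert
          (PySem.List.pyGetD head 0 "")         -- head[0]: exact under Pre_ (blocks non-empty)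
          ((head.drop 2).map pvRowB)).update    -- head[2:]
        (pvParse ((x :: rest).drop (cut + 1))).items
  termination_by ls => ls.length
  decreasing_by simp

def make_cook_book_alt (file : String) : List (String × List (List (String × String))) :=
  (pvParse (pvSplit file "\n" ++ [""])).items

-- ===== PRECONDITION & SPEC =====
-- Pre_ = exactly the inputs where Python A returns: every block (maximal run of non-empty lines,
-- delimited by the empty lines of split-plus-sentinel) is non-empty (else IndexError on i[0]) and
-- each of its lines past the first two splits on ' | ' into ≥ 3 parts (else IndexError on li[1]/li[2]).
def Pre_make_cook_book (file : String) : Prop :=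
  ∀ b ∈ ((pvSplit file "\n" ++ [""]).splitOn "").dropLast,
    b ≠ [] ∧ ∀ l ∈ b.drop 2, 3 ≤ (pvSplit l " | ").length
instance (file : String) : Decidable (Pre_make_cook_book file) := by
  unfold Pre_make_cook_book; infer_instance

def pvWitness_make_cook_book : String := "Soup\n2\nwater | 1 | l"

def Spec_make_cook_book (file : String) (out : List (String × List (List (String × String)))) : Prop := out = make_cook_book_alt file
instance (file : String) (out : List (String × List (List (String × String)))) : Decidable (Spec_make_cook_book file out) := by unfold Spec_make_cook_book; infer_instance

-- ===== CLAIM (what is proved, stated in full; the proofs are below) =====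
def Claim_equal_make_cook_book : Prop := ∀ (file : String), Dom_make_cook_book file → Pre_make_cook_book file → Spec_make_cook_book file (make_cook_book file)

-- ===== LEMMAS AND PROOFS =====

-- A's insert-then-append-in-a-loop equals one insert of the mapped list
lemma pvFoldModify (xs : List String) (d : PySem.Dict String (List (List (String × String))))
    (key : String) (v : List (List (String × String))) :
    xs.foldl (fun cb ingr => cb.modify key [] (· ++ [pvIngrRow ingr])) (d.insert key v)
      = d.insert key (v ++ xs.map pvIngrRow) := by
  induction xs generalizing d v with
  | nil => simp
  | cons x xs ih =>
    simp only [List.foldl_cons, List.map_cons]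
    rw [show ((d.insert key v).modify key [] (· ++ [pvIngrRow x]))
          = d.insert key (v ++ [pvIngrRow x]) by
        simp [PySem.Dict.modify, PySem.Dict.getD_insert_self, PySem.Dict.insert_insert_self],
      ih, List.append_assoc]
    rfl

lemma pvAddDish_eq (cb : PySem.Dict String (List (List (String × String)))) (i : List String) :
    pvAddDish cb i
      = cb.insert (PySem.List.pyGetD i 0 "")
          ((PySem.List.slice i (some 2) none).map pvIngrRow) := by
  unfold pvAddDish
  rw [pvFoldModify]
  rfl


lemma pvContainsMap {κ ν : Type} [BEq κ] [LawfulBEq κ] (l : List (κ × ν)) (k j : κ) (v : ν) :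
    (l.map (fun p => if p.1 == k then (k, v) else p)).any (fun p => p.1 == j)
      = l.any (fun p => p.1 == j) := by
  induction l with
  | nil => rfl
  | cons p t ih =>
    simp only [List.map_cons, List.any_cons, ih]
    congr 1
    split
    · next h => rw [eq_of_beq h]
    · rfl

lemma pvK3 {κ ν : Type} [BEq κ] [LawfulBEq κ] (d : PySem.Dict κ ν) (k k' : κ) (v w : ν)
    (hk : d.contains k = true) (hne : (k' == k) = false) :
    (d.insert k' w).insert k v = (d.insert k v).insert k' w := by
  have hne' : k' ≠ k := ne_of_beq_false hne
  rcases d with ⟨l⟩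
  simp only [PySem.Dict.contains] at hk
  by_cases hk' : l.any (fun p => p.1 == k') = true
  · simp only [PySem.Dict.insert, PySem.Dict.contains, hk, hk', pvContainsMap, if_true]
    congr 1
    simp only [List.map_map]
    apply List.map_congr_left
    intro p _
    rcases p with ⟨a, b⟩
    by_cases h1 : a = k <;> by_cases h2 : a = k' <;>
      simp_all [Function.comp]
  · simp only [Bool.not_eq_true] at hk'
    simp only [PySem.Dict.insert, PySem.Dict.contains, hk, hk', pvContainsMap, if_true,
      Bool.false_eq_true, if_false, List.any_append, List.any_cons, List.any_nil]
    simp [hne, List.map_append]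

lemma pvK2 {κ ν : Type} [BEq κ] [LawfulBEq κ] (suf : List (κ × ν)) (d : PySem.Dict κ ν)
    (k : κ) (v : ν) (hk : d.contains k = true) (hs : ∀ p ∈ suf, (p.1 == k) = false) :
    (d.update suf).insert k v = (d.insert k v).update suf := by
  induction suf generalizing d with
  | nil => rfl
  | cons q t ih =>
    simp only [PySem.Dict.update, List.foldl_cons] at *
    rw [ih (d.insert q.1 q.2) (by simp [PySem.Dict.contains_insert, hk]),
        pvK3 d k q.1 v q.2 hk (hs q (by simp))]
    · intro p hp; exact hs p (by simp [hp])

lemma pvNodupSplit {κ ν : Type} [BEq κ] [LawfulBEq κ] (e : PySem.Dict κ ν) (k : κ)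
    (hnd : e.keys.Nodup) (hk : e.contains k = true) :
    ∃ pre v0 suf, e.items = pre ++ (k, v0) :: suf ∧ (∀ p ∈ pre, (p.1 == k) = false)
      ∧ (∀ p ∈ suf, (p.1 == k) = false) := by
  rcases e with ⟨l⟩
  simp only [PySem.Dict.contains, List.any_eq_true] at hk
  obtain ⟨p, hp, hpk⟩ := hk
  obtain ⟨pre, suf, rfl⟩ := List.append_of_mem hp
  refine ⟨pre, p.2, suf, by rw [← eq_of_beq hpk], ?_, ?_⟩ <;>
  · intro q hq
    simp only [PySem.Dict.keys, List.map_append, List.map_cons, List.nodup_append,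
      List.nodup_cons, List.mem_map] at hnd
    rw [beq_eq_false_iff_ne]
    intro hqk
    rcases hnd with ⟨h1, h2, h3⟩
    first
    | exact h3 k ⟨q, hq, hqk⟩ p.1 (by simp) ((eq_of_beq hpk).symm)
    | exact h2.1 ⟨q, hq, by rw [hqk, eq_of_beq hpk]⟩

lemma pvUpdApp {κ ν : Type} [BEq κ] (d : PySem.Dict κ ν) (xs ys : List (κ × ν)) :
    d.update (xs ++ ys) = (d.update xs).update ys := by
  simp [PySem.Dict.update, List.foldl_append]

lemma pvUpdCons {κ ν : Type} [BEq κ] (d : PySem.Dict κ ν) (p : κ × ν) (ys : List (κ × ν)) :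
    d.update (p :: ys) = (d.insert p.1 p.2).update ys := rfl

lemma pvK {κ ν : Type} [BEq κ] [LawfulBEq κ] (e d : PySem.Dict κ ν) (k : κ) (v : ν)
    (hnd : e.keys.Nodup) :
    d.update ((e.insert k v).items) = (d.update e.items).insert k v := by
  by_cases hk : e.contains k = true
  · obtain ⟨pre, v0, suf, hitems, hpre, hsuf⟩ := pvNodupSplit e k hnd hk
    have hins : (e.insert k v).items = pre ++ (k, v) :: suf := by
      simp only [PySem.Dict.insert, hk, if_true, hitems, List.map_append, List.map_cons,
        beq_self_eq_true, if_true]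
      congr 1
      · conv_rhs => rw [← List.map_id pre]
        exact List.map_congr_left (fun p hp => by simp [hpre p hp])
      · congr 1
        conv_rhs => rw [← List.map_id suf]
        exact List.map_congr_left (fun p hp => by simp [hsuf p hp])
    rw [hins, hitems, pvUpdApp, pvUpdApp, pvUpdCons, pvUpdCons]
    rw [pvK2 suf _ k v (by simp [PySem.Dict.contains_insert_self]) hsuf,
        PySem.Dict.insert_insert_self]
  · simp only [Bool.not_eq_true] at hk
    rw [PySem.Dict.items_insert_of_not_contains (h := hk), pvUpdApp, pvUpdCons]
    rfl

lemma pvU {κ ν β : Type} [BEq κ] [LawfulBEq κ] (key : β → κ) (val : β → ν) :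
    ∀ (bs : List β) (e d : PySem.Dict κ ν), e.keys.Nodup →
    d.update ((bs.foldl (fun d b => d.insert (key b) (val b)) e).items)
      = bs.foldl (fun d b => d.insert (key b) (val b)) (d.update e.items) := by
  intro bs
  induction bs with
  | nil => intro e d _; rfl
  | cons b t ih =>
    intro e d hnd
    simp only [List.foldl_cons]
    rw [ih _ _ (PySem.Dict.nodup_keys_insert _ _ _ hnd), pvK e d _ _ hnd]


-- ===== list-side lemmas =====

-- A's enumerate index is bound but unused: the fold is a plain fold over the lines
lemma pvEnumFold (xs : List String) (n : Int) (s : List (List String) × List String) :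
    (PySem.List.enumerate xs n).foldl pvFormatStep s
      = xs.foldl (fun s line => pvFormatStep s (0, line)) s := by
  induction xs generalizing n s with
  | nil => rfl
  | cons x t ih => simp [PySem.List.enumerate_cons, pvFormatStep, ih]

-- over lines without an empty one the state machine only extends the current block
lemma pvNoEmpty (xs : List String) (h : "" ∉ xs) (bs : List (List String)) (cur : List String) :
    xs.foldl (fun s line => pvFormatStep s (0, line)) (bs, cur) = (bs, cur ++ xs) := by
  induction xs generalizing cur with
  | nil => simp
  | cons x t ih =>
    have hx : x ≠ "" := fun hx => h (hx ▸ List.mem_cons_self)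
    rw [List.foldl_cons, show pvFormatStep (bs, cur) (0, x) = (bs, cur ++ [x]) by
          simp [pvFormatStep, hx],
        ih (fun hm => h (List.mem_cons_of_mem _ hm))]
    simp

-- finished blocks are only ever appended to the accumulator
lemma pvPrefix (xs : List String) (bs : List (List String)) (cur : List String) :
    xs.foldl (fun s line => pvFormatStep s (0, line)) (bs, cur)
      = (bs ++ (xs.foldl (fun s line => pvFormatStep s (0, line)) ([], cur)).1,
         (xs.foldl (fun s line => pvFormatStep s (0, line)) ([], cur)).2) := by
  induction xs generalizing bs cur with
  | nil => simp
  | cons x t ih =>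
    simp only [List.foldl_cons]
    by_cases hx : x = ""
    · rw [show pvFormatStep (bs, cur) (0, x) = (bs ++ [cur], []) by simp [pvFormatStep, hx],
          show pvFormatStep ([], cur) (0, x) = ([] ++ [cur], []) by simp [pvFormatStep, hx],
          ih, ih (bs := [] ++ [cur])]
      simp
    · rw [show pvFormatStep (bs, cur) (0, x) = (bs, cur ++ [x]) by simp [pvFormatStep, hx],
          show pvFormatStep ([], cur) (0, x) = ([], cur ++ [x]) by simp [pvFormatStep, hx]]
      exact ih ..

lemma pvFmtNone (ls : List String) (h : "" ∉ ls) : pvFormating ls = [] := by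
  unfold pvFormating
  rw [pvEnumFold, pvNoEmpty ls h]

lemma pvFmtSplit (pre suf : List String) (h : "" ∉ pre) :
    pvFormating (pre ++ "" :: suf) = pre :: pvFormating suf := by
  unfold pvFormating
  rw [pvEnumFold, pvEnumFold, List.foldl_append, pvNoEmpty pre h, List.foldl_cons,
      show pvFormatStep ([], [] ++ pre) (0, "") = ([pre], []) by simp [pvFormatStep],
      pvPrefix suf [pre] []]
  simp

-- List.splitOn on an explicit first-empty-line decomposition
lemma pvSplitSplit (pre suf : List String) (h : "" ∉ pre) :
    (pre ++ "" :: suf).splitOn "" = pre :: suf.splitOn "" := by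
  induction pre with
  | nil => simp [List.splitOn]
  | cons p t ih =>
    have hp : p ≠ "" := fun hp => h (hp ▸ List.mem_cons_self)
    have ht : "" ∉ t := fun hm => h (List.mem_cons_of_mem _ hm)
    simp only [List.cons_append, List.splitOn, List.splitOnP_cons, beq_iff_eq, hp, if_false]
    simp only [List.splitOn] at ih
    rw [ih ht, List.modifyHead]

-- B's row dict (dict(zip(keys, parts))) equals A's field-by-field dict on rows with ≥ 3 parts
lemma pvRowEq (row : String) (h : 3 ≤ (pvSplit row " | ").length) : pvRowB row = pvIngrRow row := by
  unfold pvRowB pvIngrRow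
  rcases hp : pvSplit row " | " with _ | ⟨p0, _ | ⟨p1, _ | ⟨p2, t⟩⟩⟩ <;>
    rw [hp] at h <;> simp only [List.length] at h
  · omega
  · omega
  · omega
  · simp [PySem.Dict.ofList, PySem.Dict.update, PySem.Dict.insert, PySem.Dict.contains,
      PySem.Dict.empty, PySem.List.pyGetD_ofNat']

-- main induction: the recursive parser equals grouping followed by the dict-building fold
lemma pvMain : ∀ (n : Nat) (ls : List String), ls.length ≤ n →
    (∀ b ∈ (ls.splitOn "").dropLast, ∀ l ∈ b.drop 2, 3 ≤ (pvSplit l " | ").length) →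
    pvParse ls = (pvFormating ls).foldl pvAddDish PySem.Dict.empty := by
  intro n
  induction n with
  | zero =>
    intro ls hl _
    rw [List.length_eq_zero_iff.mp (Nat.le_zero.mp hl)]
    simp [pvParse, pvFormating, PySem.List.enumerate]
  | succ n ih =>
    intro ls hl H
    cases ls with
    | nil => simp [pvParse, pvFormating, PySem.List.enumerate]
    | cons x rest =>
      cases hidx : PySem.List.index? (x :: rest) "" with
      | none =>
        have hne : "" ∉ x :: rest := (PySem.List.index?_eq_none_iff _ _).mp hidx
        have hidx' : List.idxOf? "" (x :: rest) = none := by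
          rw [← PySem.List.index?_eq_idxOf?]; exact hidx
        rw [pvFmtNone _ hne]
        simp [pvParse, hidx']
      | some cut =>
        obtain ⟨pre, suf, hls, hlen, hpre⟩ := (PySem.List.index?_eq_some_iff _ _ _).mp hidx
        have htake : (x :: rest).take cut = pre := by rw [hls]; exact List.take_left' hlen
        have hdrop : (x :: rest).drop (cut + 1) = suf := by
          rw [hls, show pre ++ "" :: suf = (pre ++ [""]) ++ suf by simp]
          exact List.drop_left' (by simp [hlen])
        have hfmt : pvFormating (x :: rest) = pre :: pvFormating suf := by
          rw [hls]; exact pvFmtSplit pre suf hpre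
        have hsplit : ((x :: rest).splitOn "").dropLast = pre :: (suf.splitOn "").dropLast := by
          rw [hls, pvSplitSplit pre suf hpre]
          exact List.dropLast_cons_of_ne_nil
            (by unfold List.splitOn; exact List.splitOnP_ne_nil _ _)
        have Hpre : ∀ l ∈ pre.drop 2, 3 ≤ (pvSplit l " | ").length := fun l hlmem =>
          H pre (by rw [hsplit]; exact List.mem_cons_self) l hlmem
        have Hsuf : ∀ b ∈ (suf.splitOn "").dropLast, ∀ l ∈ b.drop 2,
            3 ≤ (pvSplit l " | ").length := fun b hb =>
          H b (by rw [hsplit]; exact List.mem_cons_of_mem _ hb)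
        have hsuflen : suf.length ≤ n := by
          have h1 : (x :: rest).length = pre.length + ("" :: suf).length := by
            rw [hls, List.length_append]
          simp only [List.length_cons] at hl h1
          omega
        have hparse : pvParse (x :: rest)
            = ((PySem.Dict.empty : PySem.Dict String (List (List (String × String)))).insert
                 (PySem.List.pyGetD pre 0 "") ((pre.drop 2).map pvRowB)).update
                (pvParse suf).items := by
          have hidx' : List.idxOf? "" (x :: rest) = some cut := by
            rw [← PySem.List.index?_eq_idxOf?]; exact hidx
          rw [pvParse, hidx]
          simp only [htake, hdrop]
        have hval : (pre.drop 2).map pvRowB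
            = (PySem.List.slice pre (some 2) none).map pvIngrRow := by
          rw [PySem.List.slice_from pre (by norm_num), show ((2 : Int)).toNat = 2 from rfl]
          exact List.map_congr_left fun l hlmem => pvRowEq l (Hpre l hlmem)
        have hAdd : pvAddDish = fun cb i => cb.insert (PySem.List.pyGetD i 0 "")
            ((PySem.List.slice i (some 2) none).map pvIngrRow) :=
          funext fun cb => funext fun i => pvAddDish_eq cb i
        rw [hparse, ih suf hsuflen Hsuf, hfmt, List.foldl_cons, hAdd, hval]
        exact pvU _ _ (pvFormating suf) PySem.Dict.empty _ PySem.Dict.nodup_keys_empty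

-- ===== VERDICT (by name: the statement is the Claim_ definition above) =====
theorem make_cook_book_spec : Claim_equal_make_cook_book := by
  intro file _ hpre
  unfold Spec_make_cook_book make_cook_book make_cook_book_alt
  show ((pvFormating (pvSplit file "\n" ++ [""])).foldl pvAddDish PySem.Dict.empty).items
    = (pvParse (pvSplit file "\n" ++ [""])).items
  rw [pvMain (pvSplit file "\n" ++ [""]).length _ le_rfl (fun b hb => (hpre b hb).2)]
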